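-- pv_equiv track=rewrite | github.com/z4ziggy/P4RS3LT0NGV3 | parsel_app.py | to_fullwidth
-- ===== SOURCE A (Python) =====
-- def to_fullwidth(text: str) -> str:
--     """Convert text to fullwidth characters"""
--     if not text:
--         return ""
--     # Map for fullwidth text
--     fullwidth_map = {
--         'a': '\uff41', 'b': '\uff42', 'c': '\uff43', 'd': '\uff44', 'e': '\uff45', 'f': '\uff46', 'g': '\uff47', 'h': '\uff48', 'i': '\uff49',
--         'j': '\uff4a', 'k': '\uff4b', 'l': '\uff4c', 'm': '\uff4d', 'n': '\uff4e', 'o': '\uff4f', 'p': '\uff50', 'q': '\uff51', 'r': '\uff52',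
--         's': '\uff53', 't': '\uff54', 'u': '\uff55', 'v': '\uff56', 'w': '\uff57', 'x': '\uff58', 'y': '\uff59', 'z': '\uff5a',
--         'A': '\uff21', 'B': '\uff22', 'C': '\uff23', 'D': '\uff24', 'E': '\uff25', 'F': '\uff26', 'G': '\uff27', 'H': '\uff28', 'I': '\uff29',
--         'J': '\uff2a', 'K': '\uff2b', 'L': '\uff2c', 'M': '\uff2d', 'N': '\uff2e', 'O': '\uff2f', 'P': '\uff30', 'Q': '\uff31', 'R': '\uff32',
--         'S': '\uff33', 'T': '\uff34', 'U': '\uff35', 'V': '\uff36', 'W': '\uff37', 'X': '\uff38', 'Y': '\uff39', 'Z': '\uff3a',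
--         '0': '\uff10', '1': '\uff11', '2': '\uff12', '3': '\uff13', '4': '\uff14', '5': '\uff15', '6': '\uff16', '7': '\uff17', '8': '\uff18', '9': '\uff19',
--         ' ': '\u3000', '!': '\uff01', '?': '\uff1f', '.': '\uff0e', ',': '\uff0c', ';': '\uff1b', ':': '\uff1a', '(': '\uff08', ')': '\uff09',
--         '[': '\uff3b', ']': '\uff3d', '{': '\uff5b', '}': '\uff5d', '<': '\uff1c', '>': '\uff1e', '\\': '\uff3c', '/': '\uff0f', '|': '\uff5c',
--         '`': '\uff40', '~': '\uff5e', '@': '\uff20', '#': '\uff03', '$': '\uff04', '%': '\uff05', '^': '\uff3e', '&': '\uff06', '*': '\uff0a',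
--         '-': '\uff0d', '_': '\uff3f', '+': '\uff0b', '=': '\uff1d', '"': '\uff02', '\'': '\uff07'
--     }
--     return ''.join(fullwidth_map.get(c, c) for c in text)
-- ===== SOURCE B (Python) =====
-- def to_fullwidth(text: str) -> str:
--     """Convert text to fullwidth characters"""
--     return ''.join(
--         '\u3000' if c == ' '
--         else chr(ord(c) + 0xFEE0) if '!' <= c <= '~'
--         else c
--         for c in text)
-- ===== Notes on version B (the rewrite author's own statement) =====
-- stated objective: simpler
-- what changed: Replaces the explicit 95-entry lookup table with the closed-form arithmetic mapping chr(ord(c)+0xFEE0) for '!'..'~' with space special-cased to U+3000.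
import Mathlib
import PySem

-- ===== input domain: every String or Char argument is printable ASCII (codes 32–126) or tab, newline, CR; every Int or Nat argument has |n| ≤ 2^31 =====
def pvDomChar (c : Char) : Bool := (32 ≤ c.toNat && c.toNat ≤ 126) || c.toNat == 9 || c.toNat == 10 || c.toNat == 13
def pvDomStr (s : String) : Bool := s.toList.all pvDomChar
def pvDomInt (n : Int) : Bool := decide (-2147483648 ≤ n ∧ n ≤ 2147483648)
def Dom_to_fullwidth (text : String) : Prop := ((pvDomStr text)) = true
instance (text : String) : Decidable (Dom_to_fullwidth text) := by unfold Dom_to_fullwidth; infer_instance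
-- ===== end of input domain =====

set_option maxRecDepth 4000


-- B replaces A's explicit 95-entry fullwidth lookup table by the closed-form
-- arithmetic map chr(ord(c)+0xFEE0) on '!'..'~', with ' ' ↦ U+3000 (objective: simpler).

-- ===== PORT A =====
def fullwidthMap : PySem.Dict Char String := PySem.Dict.ofList [
    ('a', "\uFF41"),
    ('b', "\uFF42"),
    ('c', "\uFF43"),
    ('d', "\uFF44"),
    ('e', "\uFF45"),
    ('f', "\uFF46"),
    ('g', "\uFF47"),
    ('h', "\uFF48"),
    ('i', "\uFF49"),
    ('j', "\uFF4A"),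
    ('k', "\uFF4B"),
    ('l', "\uFF4C"),
    ('m', "\uFF4D"),
    ('n', "\uFF4E"),
    ('o', "\uFF4F"),
    ('p', "\uFF50"),
    ('q', "\uFF51"),
    ('r', "\uFF52"),
    ('s', "\uFF53"),
    ('t', "\uFF54"),
    ('u', "\uFF55"),
    ('v', "\uFF56"),
    ('w', "\uFF57"),
    ('x', "\uFF58"),
    ('y', "\uFF59"),
    ('z', "\uFF5A"),
    ('A', "\uFF21"),
    ('B', "\uFF22"),
    ('C', "\uFF23"),
    ('D', "\uFF24"),
    ('E', "\uFF25"),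
    ('F', "\uFF26"),
    ('G', "\uFF27"),
    ('H', "\uFF28"),
    ('I', "\uFF29"),
    ('J', "\uFF2A"),
    ('K', "\uFF2B"),
    ('L', "\uFF2C"),
    ('M', "\uFF2D"),
    ('N', "\uFF2E"),
    ('O', "\uFF2F"),
    ('P', "\uFF30"),
    ('Q', "\uFF31"),
    ('R', "\uFF32"),
    ('S', "\uFF33"),
    ('T', "\uFF34"),
    ('U', "\uFF35"),
    ('V', "\uFF36"),
    ('W', "\uFF37"),
    ('X', "\uFF38"),
    ('Y', "\uFF39"),
    ('Z', "\uFF3A"),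
    ('0', "\uFF10"),
    ('1', "\uFF11"),
    ('2', "\uFF12"),
    ('3', "\uFF13"),
    ('4', "\uFF14"),
    ('5', "\uFF15"),
    ('6', "\uFF16"),
    ('7', "\uFF17"),
    ('8', "\uFF18"),
    ('9', "\uFF19"),
    (' ', "\u3000"),
    ('!', "\uFF01"),
    ('?', "\uFF1F"),
    ('.', "\uFF0E"),
    (',', "\uFF0C"),
    (';', "\uFF1B"),
    (':', "\uFF1A"),
    ('(', "\uFF08"),
    (')', "\uFF09"),
    ('[', "\uFF3B"),
    (']', "\uFF3D"),
    ('{', "\uFF5B"),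
    ('}', "\uFF5D"),
    ('<', "\uFF1C"),
    ('>', "\uFF1E"),
    ('\\', "\uFF3C"),
    ('/', "\uFF0F"),
    ('|', "\uFF5C"),
    ('`', "\uFF40"),
    ('~', "\uFF5E"),
    ('@', "\uFF20"),
    ('#', "\uFF03"),
    ('$', "\uFF04"),
    ('%', "\uFF05"),
    ('^', "\uFF3E"),
    ('&', "\uFF06"),
    ('*', "\uFF0A"),
    ('-', "\uFF0D"),
    ('_', "\uFF3F"),
    ('+', "\uFF0B"),
    ('=', "\uFF1D"),
    ('"', "\uFF02"),
    ('\'', "\uFF07")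
  ]

def to_fullwidth (text : String) : String :=
  if text = "" then ""
  else String.join (text.toList.map (fun c => fullwidthMap.getD c (String.mk [c])))

-- ===== PORT B =====
def fwChar (c : Char) : String :=
  if c = ' ' then "\u3000"
  else if '!' ≤ c && c ≤ '~' then String.mk [Char.ofNat (c.toNat + 0xFEE0)]
  else String.mk [c]

def to_fullwidth_alt (text : String) : String :=
  String.join (text.toList.map fwChar)

-- ===== PRECONDITION & SPEC =====
def Spec_to_fullwidth (text : String) (out : String) : Prop := out = to_fullwidth_alt text
instance (text : String) (out : String) : Decidable (Spec_to_fullwidth text out) := by unfold Spec_to_fullwidth; infer_instance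

-- ===== CLAIM (what is proved, stated in full; the proofs are below) =====
def Claim_equal_to_fullwidth : Prop := ∀ (text : String), Dom_to_fullwidth text → Spec_to_fullwidth text (to_fullwidth text)

-- ===== LEMMAS AND PROOFS =====

-- the table lookup and the arithmetic map agree on every Char with code < 127
theorem fwChar_eq_lookup_lt (n : Nat) (h : n < 127) :
    fullwidthMap.getD (Char.ofNat n) (String.mk [Char.ofNat n]) = fwChar (Char.ofNat n) := by
  revert n h; decide

theorem fwChar_eq_lookup (c : Char) (h : pvDomChar c = true) :
    fullwidthMap.getD c (String.mk [c]) = fwChar c := by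
  have hlt : c.toNat < 127 := by
    simp [pvDomChar] at h
    omega
  have := fwChar_eq_lookup_lt c.toNat hlt
  simpa [Char.ofNat_toNat] using this

-- ===== VERDICT (by name: the statement is the Claim_ definition above) =====
theorem to_fullwidth_spec : Claim_equal_to_fullwidth := by
  intro text hdom
  unfold Spec_to_fullwidth to_fullwidth to_fullwidth_alt
  split_ifs with h
  · simp [h, String.join]
  · congr 1
    apply List.map_congr_left
    intro c hc
    apply fwChar_eq_lookup
    have := hdom
    unfold Dom_to_fullwidth pvDomStr at this
    exact List.all_eq_true.mp this c hc
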